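-- pv_equiv track=rewrite | github.com/NicolaTommasini/ms_python | eval_ms.py | replace_multiple_signs
-- ===== SOURCE A (Python) =====
-- def replace_multiple_signs(expression: str) -> str:
--     result = ""
--     i = 0
--     while i < len(expression):
--         if expression[i] in '--':
--             sign = expression[i]
--             count = 1
--
--             while i + count < len(expression) and expression[i + count] == sign:
--                 count += 1
--
--             if count % 2 == 0:
--                 result += '+'
--             else:
--                 result += '-'
--
--             i += count
--         else:
--             result += expression[i]
--             i += 1
--     return result
-- ===== SOURCE B (Python) =====
-- def replace_multiple_signs(expression: str) -> str:
--     parts = []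
--     run_char = None
--     run_len = 0
--
--     def flush():
--         if run_len:
--             if run_char == '-':
--                 parts.append('+' if run_len % 2 == 0 else '-')
--             else:
--                 parts.append(run_char * run_len)
--
--     for ch in expression:
--         if ch == run_char:
--             run_len += 1
--         else:
--             flush()
--             run_char, run_len = ch, 1
--     flush()
--     return ''.join(parts)
-- ===== Notes on version B (the rewrite author's own statement) =====
-- stated objective: faster
-- what changed: Replaces A's manual index loop with an inner run-counting while (and quadratic result += concatenation) by a single state-machine pass that tracks the current run (char, length), flushes it into a list on change, and joins once at the end.
import Mathlib
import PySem

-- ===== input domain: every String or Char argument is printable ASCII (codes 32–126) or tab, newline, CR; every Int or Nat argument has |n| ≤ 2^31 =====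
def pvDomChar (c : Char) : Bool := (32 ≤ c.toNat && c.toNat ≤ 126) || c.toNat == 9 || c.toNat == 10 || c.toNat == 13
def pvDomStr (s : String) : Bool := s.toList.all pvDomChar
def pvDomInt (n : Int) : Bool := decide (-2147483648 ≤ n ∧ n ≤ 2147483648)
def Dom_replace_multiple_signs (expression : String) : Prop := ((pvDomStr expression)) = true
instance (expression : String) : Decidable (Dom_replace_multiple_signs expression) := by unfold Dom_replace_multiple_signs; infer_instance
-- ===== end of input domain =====

-- B replaces A's index loop with an inner run-counting while (building the result by repeated
-- string concatenation) by a single state-machine pass that flushes runs into a list joined once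
-- at the end; measured faster in a timing run (objective: faster).

-- ===== PORT A =====
-- inner while loop of A: counts how many further leading chars equal `sign`, returns the rest
def pvCountRun (sign : Char) : List Char → Nat × List Char
  | [] => (0, [])
  | c :: rest =>
    if c = sign then
      let p := pvCountRun sign rest
      (p.1 + 1, p.2)
    else (0, c :: rest)

theorem pvCountRun_len_le (sign : Char) (l : List Char) : (pvCountRun sign l).2.length ≤ l.length := by
  induction l with
  | nil => simp [pvCountRun]
  | cons c rest ih =>
    by_cases h : c = sign <;> simp [pvCountRun, h] <;> omega

-- outer while loop of A over the characters
def pvGoA : List Char → List Char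
  | [] => []
  | c :: rest =>
    if c = '-' then
      let p := pvCountRun '-' rest
      -- count = p.1 + 1 (the sign itself plus the matching ones)
      (if (p.1 + 1) % 2 = 0 then '+' else '-') :: pvGoA p.2
    else c :: pvGoA rest
termination_by l => l.length
decreasing_by
  · have := pvCountRun_len_le '-' rest; simp; omega
  · simp

def replace_multiple_signs (expression : String) : String :=
  String.ofList (pvGoA expression.toList)

-- ===== PORT B =====
-- flush(): emit the pending run (parity sign for '-', the run itself otherwise)
def pvFlushB (parts : List String) (run_char : Option Char) (run_len : Nat) : List String :=
  match run_char, run_len with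
  | some c, n + 1 =>
    parts ++ [if c = '-' then (if (n + 1) % 2 = 0 then "+" else "-")
              else String.ofList (List.replicate (n + 1) c)]
  | _, _ => parts

-- one iteration of B's for loop
def pvStepB (s : List String × Option Char × Nat) (ch : Char) : List String × Option Char × Nat :=
  if some ch = s.2.1 then (s.1, s.2.1, s.2.2 + 1)
  else (pvFlushB s.1 s.2.1 s.2.2, some ch, 1)

def replace_multiple_signs_alt (expression : String) : String :=
  let s := expression.toList.foldl pvStepB ([], none, 0)
  String.join (pvFlushB s.1 s.2.1 s.2.2)

-- ===== PRECONDITION & SPEC =====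
def Spec_replace_multiple_signs (expression : String) (out : String) : Prop := out = replace_multiple_signs_alt expression
instance (expression : String) (out : String) : Decidable (Spec_replace_multiple_signs expression out) := by unfold Spec_replace_multiple_signs; infer_instance

-- ===== CLAIM (what is proved, stated in full; the proofs are below) =====
def Claim_equal_replace_multiple_signs : Prop := ∀ (expression : String), Dom_replace_multiple_signs expression → Spec_replace_multiple_signs expression (replace_multiple_signs expression)

-- ===== LEMMAS AND PROOFS =====

-- run-length-encoding characterisation both ports are reduced to
def pvEmit (c : Char) (n : Nat) : List Char :=
  if c = '-' then [if n % 2 = 0 then '+' else '-'] else List.replicate n c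

def pvRuns : List Char → List Char
  | [] => []
  | c :: rest =>
    pvEmit c ((rest.takeWhile (· == c)).length + 1) ++ pvRuns (rest.dropWhile (· == c))
termination_by l => l.length
decreasing_by
  have := List.length_dropWhile_le (· == c) rest; simp; omega

theorem pvCountRun_eq (sign : Char) (l : List Char) :
    pvCountRun sign l = ((l.takeWhile (· == sign)).length, l.dropWhile (· == sign)) := by
  induction l with
  | nil => simp [pvCountRun]
  | cons c rest ih =>
    by_cases h : c = sign <;>
      simp [pvCountRun, ih, List.takeWhile_cons, List.dropWhile_cons, h]

theorem pvGoA_run (c : Char) (hc : ¬ c = '-') :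
    ∀ (g r : List Char), (∀ x ∈ g, x = c) → pvGoA (g ++ r) = g ++ pvGoA r := by
  intro g
  induction g with
  | nil => intro r _; simp
  | cons x t ih =>
    intro r hall
    have hx : x = c := hall x (by simp)
    have hx' : ¬ x = '-' := by rw [hx]; exact hc
    simp only [List.cons_append, pvGoA, if_neg hx']
    rw [ih r (fun y hy => hall y (by simp [hy]))]

theorem pvGoA_eq_runs : ∀ (n : Nat) (l : List Char), l.length ≤ n → pvGoA l = pvRuns l := by
  intro n
  induction n with
  | zero =>
    intro l h
    have : l = [] := by cases l <;> simp_all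
    subst this
    simp [pvGoA, pvRuns]
  | succ n ih =>
    intro l h
    cases l with
    | nil => simp [pvGoA, pvRuns]
    | cons c rest =>
      by_cases hc : c = '-'
      · subst hc
        simp only [pvGoA, pvRuns, pvEmit, if_pos rfl, pvCountRun_eq]
        have hlen : (rest.dropWhile (· == '-')).length ≤ n := by
          have := List.length_dropWhile_le (· == '-') rest
          simp at h; omega
        rw [ih _ hlen]; simp
      · have hall : ∀ x ∈ rest.takeWhile (· == c), x = c := by
          intro x hx
          have : (x == c) = true := List.mem_takeWhile_imp (p := (· == c)) hx
          simpa using this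
        have hsplit : rest = rest.takeWhile (· == c) ++ rest.dropWhile (· == c) :=
          (List.takeWhile_append_dropWhile).symm
        simp only [pvGoA, if_neg hc, pvRuns, pvEmit, if_neg hc]
        conv_lhs => rw [hsplit]
        rw [pvGoA_run c hc _ _ hall]
        have hrep : c :: rest.takeWhile (· == c) = List.replicate ((rest.takeWhile (· == c)).length + 1) c := by
          rw [List.replicate_succ]
          congr 1
          exact (List.eq_replicate_length.mpr hall)
        have hlen : (rest.dropWhile (· == c)).length ≤ n := by
          have := List.length_dropWhile_le (· == c) rest
          simp at h; omega
        rw [ih _ hlen, ← List.cons_append, hrep]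

theorem pvJoin_toList (L : List String) : ∀ a : String,
    (List.foldl (· ++ ·) a L).toList = a.toList ++ (L.map String.toList).flatten := by
  induction L with
  | nil => intro a; simp
  | cons x t ih => intro a; simp [ih]

-- the string emitted by B's flush reads back as pvEmit
theorem pvFlushB_toList (parts : List String) (c : Char) (n : Nat) :
    ((pvFlushB parts (some c) (n + 1)).map String.toList).flatten
      = (parts.map String.toList).flatten ++ pvEmit c (n + 1) := by
  by_cases hc : c = '-' <;>
    by_cases hp : (n + 1) % 2 = 0 <;>
      simp [pvFlushB, pvEmit, hc, hp]

-- the final flush of B's loop state, as one function of the state triple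
def pvFinish (s : List String × Option Char × Nat) : List String :=
  pvFlushB s.1 s.2.1 s.2.2

theorem pvB_invariant : ∀ (l : List Char) (parts : List String) (c : Char) (k : Nat),
    ((pvFinish (l.foldl pvStepB (parts, some c, k + 1))).map String.toList).flatten
      = (parts.map String.toList).flatten ++ pvEmit c (k + 1 + (l.takeWhile (· == c)).length)
        ++ pvRuns (l.dropWhile (· == c)) := by
  intro l
  induction l with
  | nil => intro parts c k; simp [pvRuns, pvFinish, pvFlushB_toList]
  | cons x t ih =>
    intro parts c k
    by_cases hx : x = c
    · subst hx
      have hstep : pvStepB (parts, some x, k + 1) x = (parts, some x, (k + 1) + 1) := by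
        simp [pvStepB]
      rw [List.foldl_cons, hstep, ih parts x (k + 1)]
      simp [List.takeWhile_cons, List.dropWhile_cons]
      ring_nf
    · have hstep : pvStepB (parts, some c, k + 1) x = (pvFlushB parts (some c) (k + 1), some x, 1) := by
        simp [pvStepB, hx]
      rw [List.foldl_cons, hstep, ih _ x 0, pvFlushB_toList]
      have hruns : pvRuns (x :: t) = pvEmit x ((t.takeWhile (· == x)).length + 1)
          ++ pvRuns (t.dropWhile (· == x)) := by rw [pvRuns]
      have hxc : (x == c) = false := by simp [hx]
      simp [hxc, hruns, Nat.add_comm]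

theorem pvAlt_toList (e : String) :
    (replace_multiple_signs_alt e).toList = pvRuns e.toList := by
  have halt : replace_multiple_signs_alt e
      = String.join (pvFinish (e.toList.foldl pvStepB ([], none, 0))) := rfl
  rw [halt]
  cases he : e.toList with
  | nil => simp [pvFinish, pvFlushB, String.join, pvRuns]
  | cons c rest =>
    have hstep : pvStepB ([], none, 0) c = ([], some c, 1) := by simp [pvStepB, pvFlushB]
    simp only [List.foldl_cons, hstep, String.join]
    rw [pvJoin_toList]
    have := pvB_invariant rest [] c 0
    simp only [List.map_nil, List.flatten_nil, List.nil_append] at this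
    simp only [this]
    rw [pvRuns]
    simp [Nat.add_comm]

-- ===== VERDICT (by name: the statement is the Claim_ definition above) =====
theorem replace_multiple_signs_spec : Claim_equal_replace_multiple_signs := by
  intro e _
  unfold Spec_replace_multiple_signs
  apply String.toList_injective
  rw [pvAlt_toList]
  unfold replace_multiple_signs
  simpa using pvGoA_eq_runs e.toList.length e.toList le_rfl
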